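-- pv_equiv track=rewrite | github.com/mankotia412vishal/DSA-Conqueror | DSA 4th Year/Gfg POTD/m.py | findAliveSoldiers
-- ===== SOURCE A (Python) =====
-- def findAliveSoldiers(n, k, soldiers_to_kill):
--     if n == 0:  # Edge case: no soldiers
--         return []
--     if k == 0:  # Edge case: no soldiers to be killed
--         return list(range(1, n+1))
--
--     soldiers = set(range(1, n+1))
--     queued = set()
--
--     for soldier in soldiers_to_kill:
--         if soldier in soldiers:
--             soldiers.remove(soldier)
--             if 2*soldier not in queued:  # Only add soldier to queue if not already in queue
--                 queued.add(2*soldier)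
--             if 2*soldier + 1 not in queued:  # Only add soldier to queue if not already in queue
--                 queued.add(2*soldier + 1)
--
--     return sorted(list(soldiers)) if soldiers else [0]
-- ===== SOURCE B (Python) =====
-- def findAliveSoldiers(n, k, soldiers_to_kill):
--     if n == 0:
--         return []
--     if k == 0:
--         return list(range(1, n+1))
--     kill = set(soldiers_to_kill)
--     alive = [i for i in range(1, n+1) if i not in kill]
--     return alive if alive else [0]
-- ===== Notes on version B (the rewrite author's own statement) =====
-- stated objective: simpler
-- what changed: B walks 1..n once skipping a prebuilt kill-set, so the output is produced already in order with no final sort and none of A's unused 'queued' bookkeeping.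
import Mathlib
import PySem

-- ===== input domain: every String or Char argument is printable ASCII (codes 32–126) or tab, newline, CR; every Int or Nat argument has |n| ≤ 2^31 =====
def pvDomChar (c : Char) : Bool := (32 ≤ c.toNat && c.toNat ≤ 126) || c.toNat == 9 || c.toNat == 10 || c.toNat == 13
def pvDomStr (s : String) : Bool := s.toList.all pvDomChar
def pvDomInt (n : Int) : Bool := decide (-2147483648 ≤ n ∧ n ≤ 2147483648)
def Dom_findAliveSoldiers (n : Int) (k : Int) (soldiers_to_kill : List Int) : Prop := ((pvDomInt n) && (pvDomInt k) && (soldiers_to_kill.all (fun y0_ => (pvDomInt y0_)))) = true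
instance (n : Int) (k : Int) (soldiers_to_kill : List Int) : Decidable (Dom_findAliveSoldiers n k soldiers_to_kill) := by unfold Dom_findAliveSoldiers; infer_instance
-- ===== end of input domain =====

-- B replaces "remove from a set of 1..n, then sort" by one pass over 1..n skipping a
-- prebuilt kill-set, producing the list already in order with no sort and without A's
-- unused 'queued' bookkeeping (objective: simpler).

-- ===== PORT A =====
-- one loop step of A: remove the soldier if alive (remove under the membership guard = discard, exact),
-- and maintain the (unused) 'queued' set exactly as A does
def pvStepA (st : PySem.Set Int × PySem.Set Int) (soldier : Int) : PySem.Set Int × PySem.Set Int :=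
  if PySem.Set.contains st.1 soldier then
    let sol := PySem.Set.discard st.1 soldier
    let qu := if ¬ (PySem.Set.contains st.2 (2*soldier) = true) then PySem.Set.add st.2 (2*soldier) else st.2
    let qu := if ¬ (PySem.Set.contains qu (2*soldier+1) = true) then PySem.Set.add qu (2*soldier+1) else qu
    (sol, qu)
  else st

def findAliveSoldiers (n : Int) (k : Int) (soldiers_to_kill : List Int) : List Int :=
  if n = 0 then []
  else if k = 0 then PySem.List.pyRange 1 (n+1) 1
  else
    let soldiers : PySem.Set Int := PySem.Set.ofList (PySem.List.pyRange 1 (n+1) 1)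
    let queued : PySem.Set Int := PySem.Set.empty
    let st := soldiers_to_kill.foldl pvStepA (soldiers, queued)
    -- sorted(list(soldiers)): sorting a set with the identity key, order-independent
    if st.1 ≠ [] then PySem.List.sorted st.1 (fun x => x) else [0]

-- ===== PORT B =====
def findAliveSoldiers_alt (n : Int) (k : Int) (soldiers_to_kill : List Int) : List Int :=
  if n = 0 then []
  else if k = 0 then PySem.List.pyRange 1 (n+1) 1
  else
    let kill : PySem.Set Int := PySem.Set.ofList soldiers_to_kill
    let alive := (PySem.List.pyRange 1 (n+1) 1).filter (fun i => ¬ (PySem.Set.contains kill i = true))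
    if alive ≠ [] then alive else [0]

-- ===== PRECONDITION & SPEC =====
def Spec_findAliveSoldiers (n : Int) (k : Int) (soldiers_to_kill : List Int) (out : List Int) : Prop := out = findAliveSoldiers_alt n k soldiers_to_kill
instance (n : Int) (k : Int) (soldiers_to_kill : List Int) (out : List Int) : Decidable (Spec_findAliveSoldiers n k soldiers_to_kill out) := by unfold Spec_findAliveSoldiers; infer_instance

-- ===== CLAIM (what is proved, stated in full; the proofs are below) =====
def Claim_equal_findAliveSoldiers : Prop := ∀ (n : Int) (k : Int) (soldiers_to_kill : List Int), Dom_findAliveSoldiers n k soldiers_to_kill → Spec_findAliveSoldiers n k soldiers_to_kill (findAliveSoldiers n k soldiers_to_kill)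

-- ===== LEMMAS AND PROOFS =====

-- one step of A's loop keeps, in the first component, exactly the elements ≠ soldier
lemma pvStepA_fst (st : PySem.Set Int × PySem.Set Int) (s : Int) :
    (pvStepA st s).1 = st.1.filter (fun y => !(y == s)) := by
  unfold pvStepA
  by_cases h : PySem.Set.contains st.1 s = true
  · rw [if_pos h]; rfl
  · rw [if_neg h]
    have hs : s ∉ st.1 := by simpa [PySem.Set.contains_iff] using h
    rw [List.filter_eq_self.2]
    intro y hy
    simp only [Bool.not_eq_eq_eq_not, Bool.not_true, beq_eq_false_iff_ne]
    exact fun he => hs (he ▸ hy)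

-- A's whole loop filters out, from the first component, everything occurring in ks
lemma pvFoldA_fst (ks : List Int) (st : PySem.Set Int × PySem.Set Int) :
    (ks.foldl pvStepA st).1 = st.1.filter (fun y => decide (y ∉ ks)) := by
  induction ks generalizing st with
  | nil => simp
  | cons s ks ih =>
    rw [List.foldl_cons, ih, pvStepA_fst, List.filter_filter]
    apply List.filter_congr
    intro x _
    by_cases hxs : x = s <;> by_cases hxk : x ∈ ks <;> simp [hxs, hxk]

theorem findAliveSoldiers_spec_aux (n k : Int) (ks : List Int) :
    findAliveSoldiers n k ks = findAliveSoldiers_alt n k ks := by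
  unfold findAliveSoldiers findAliveSoldiers_alt
  split_ifs with h0 hk
  · rfl
  · rfl
  · have hbase : PySem.Set.ofList (PySem.List.pyRange 1 (n+1) 1) = PySem.List.pyRange 1 (n+1) 1 :=
      PySem.Set.ofList_eq_self_of_nodup _ (PySem.List.nodup_pyRange_one 1 (n+1))
    have hfold : (ks.foldl pvStepA (PySem.Set.ofList (PySem.List.pyRange 1 (n+1) 1), PySem.Set.empty)).1
        = (PySem.List.pyRange 1 (n+1) 1).filter
            (fun i => ¬ (PySem.Set.contains (PySem.Set.ofList ks) i = true)) := by
      rw [pvFoldA_fst]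
      simp only [hbase]
      apply List.filter_congr
      intro x _
      simp [PySem.Set.mem_ofList]
    have hsorted : PySem.List.sorted
        ((PySem.List.pyRange 1 (n+1) 1).filter
          (fun i => ¬ (PySem.Set.contains (PySem.Set.ofList ks) i = true))) (fun x => x)
        = (PySem.List.pyRange 1 (n+1) 1).filter
            (fun i => ¬ (PySem.Set.contains (PySem.Set.ofList ks) i = true)) := by
      apply PySem.List.sorted_eq_self_of_pairwise
      exact ((PySem.List.pairwise_lt_pyRange_one 1 (n+1)).filter _).imp le_of_lt
    simp only [hfold, hsorted]

-- ===== VERDICT (by name: the statement is the Claim_ definition above) =====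
theorem findAliveSoldiers_spec : Claim_equal_findAliveSoldiers := by
  intro n k ks _
  exact findAliveSoldiers_spec_aux n k ks
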